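-- pv_equiv track=rewrite | github.com/JorenBijnensPXL/java-oef | IT-Essentials-oefeningen/test oefen/vraag 1.py | lijsten_maken
-- ===== SOURCE A (Python) =====
-- def lijsten_maken(artikel):
--     A_artikel_list = []
--     S_artikel_list = []
--     for i in range(len(artikel)):
--         if artikel[i][0] == "S" and int(artikel[i][3]) > int(artikel[i][4]):
--             bijbestelen = int(artikel[i][3]) - int(artikel[i][4])
--             while bijbestelen % int(artikel[i][2]) != 0:
--                 bijbestelen += 1
--             S_artikel_list.append(bijbestelen)
--         elif artikel[i][0] == "A" and int(artikel[i][3]) != 0: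
--             A_artikel_list.append(artikel[i])
--     return S_artikel_list, A_artikel_list
-- ===== SOURCE B (Python) =====
-- def lijsten_maken(artikel):
--     reorder = []
--     active = []
--     for row in artikel:
--         if row[0] == "S":
--             d = int(row[3]) - int(row[4])
--             if d > 0:
--                 m = abs(int(row[2]))
--                 reorder.append(d + (-d) % m)
--         elif row[0] == "A" and int(row[3]) != 0:
--             active.append(row)
--     return reorder, active
-- ===== Notes on version B (the rewrite author's own statement) =====
-- stated objective: alternative
-- what changed: The per-record increment-until-divisible while loop is replaced by a closed-form modular rounding (d + (-d) % |m|), and the index loop by direct iteration over rows.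
import Mathlib
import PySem

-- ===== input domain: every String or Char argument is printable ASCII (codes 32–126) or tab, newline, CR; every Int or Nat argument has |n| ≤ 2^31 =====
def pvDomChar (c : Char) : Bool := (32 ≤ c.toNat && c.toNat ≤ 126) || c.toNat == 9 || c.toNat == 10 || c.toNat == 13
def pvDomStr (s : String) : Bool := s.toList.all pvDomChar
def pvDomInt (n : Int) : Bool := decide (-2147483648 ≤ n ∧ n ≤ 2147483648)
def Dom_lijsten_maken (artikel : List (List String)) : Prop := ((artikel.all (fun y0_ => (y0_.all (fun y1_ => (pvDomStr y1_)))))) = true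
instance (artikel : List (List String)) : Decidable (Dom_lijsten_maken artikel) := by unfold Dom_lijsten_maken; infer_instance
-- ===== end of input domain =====

-- B replaces A's increment-until-divisible while loop by one modular rounding step; equivalence is about the return value (A mutates nothing).

-- row[j] followed by int(...): none exactly where Python raises IndexError/ValueError
def pvParse (row : List String) (j : Int) : Option Int :=
  (PySem.List.pyGet? row j).bind PySem.Int.ofStr?

-- ===== PORT A =====
-- 'while bijbestelen % int(artikel[i][2]) != 0: bijbestelen += 1'; fuel m.natAbs suffices (m ≠ 0 under Pre_)
def aWhile (fuel : Nat) (b m : Int) : Int :=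
  match fuel with
  | 0 => b
  | f + 1 => if (PySem.Int.mod? b m).getD 0 ≠ 0 then aWhile f (b + 1) m else b

-- loop body of A; state (A_artikel_list, S_artikel_list), created in that order in the Python
def aStep (st : List (List String) × List Int) (row : List String) :
    List (List String) × List Int :=
  let toI := fun (j : Int) => (pvParse row j).getD 0
  if (PySem.List.pyGet? row 0).getD "" = "S" ∧ toI 3 > toI 4 then
    let bijbestelen := toI 3 - toI 4
    (st.1, st.2 ++ [aWhile (toI 2).natAbs bijbestelen (toI 2)])
  else if (PySem.List.pyGet? row 0).getD "" = "A" ∧ toI 3 ≠ 0 then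
    (st.1 ++ [row], st.2)
  else st

def lijsten_maken (artikel : List (List String)) : List Int × List (List String) :=
  let st := (PySem.List.pyRange 0 artikel.length 1).foldl
    (fun st i => aStep st (PySem.List.pyGetD artikel i [])) ([], [])
  (st.2, st.1)

-- ===== PORT B =====
def bStep (st : List Int × List (List String)) (row : List String) :
    List Int × List (List String) :=
  let k := (PySem.List.pyGet? row 0).getD ""
  if k = "S" then
    let d := (pvParse row 3).getD 0 - (pvParse row 4).getD 0
    if d > 0 then
      let m := |(pvParse row 2).getD 0|
      (st.1 ++ [d + (PySem.Int.mod? (-d) m).getD 0], st.2)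
    else st
  else if k = "A" ∧ (pvParse row 3).getD 0 ≠ 0 then
    (st.1, st.2 ++ [row])
  else st

def lijsten_maken_alt (artikel : List (List String)) : List Int × List (List String) :=
  artikel.foldl bStep ([], [])

-- ===== PRECONDITION & SPEC =====
-- Pre_ excludes exactly the inputs where A raises: an empty row (IndexError on row[0]);
-- an "S" row whose row[3]/row[4] are missing or non-int, or (when a reorder is due) whose
-- row[2] is missing, non-int or zero (ZeroDivisionError); an "A" row whose row[3] is
-- missing or non-int.
def Pre_lijsten_maken (artikel : List (List String)) : Prop :=
  ∀ row ∈ artikel, row ≠ [] ∧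
    (row.headD "" = "S" →
      (pvParse row 3).isSome ∧ (pvParse row 4).isSome ∧
      ((pvParse row 3).getD 0 > (pvParse row 4).getD 0 →
        (pvParse row 2).isSome ∧ (pvParse row 2).getD 0 ≠ 0)) ∧
    (row.headD "" = "A" → (pvParse row 3).isSome)
instance (artikel : List (List String)) : Decidable (Pre_lijsten_maken artikel) := by
  unfold Pre_lijsten_maken; infer_instance

def pvWitness_lijsten_maken : List (List String) :=
  [["S", "x", "3", "7", "2"], ["A", "y", "z", "5"], ["X"], ["S", "x", "4", "1", "9"]]

def Spec_lijsten_maken (artikel : List (List String)) (out : List Int × List (List String)) : Prop := out = lijsten_maken_alt artikel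
instance (artikel : List (List String)) (out : List Int × List (List String)) : Decidable (Spec_lijsten_maken artikel out) := by unfold Spec_lijsten_maken; infer_instance

-- ===== CLAIM (what is proved, stated in full; the proofs are below) =====
def Claim_equal_lijsten_maken : Prop := ∀ (artikel : List (List String)), Dom_lijsten_maken artikel → Pre_lijsten_maken artikel → Spec_lijsten_maken artikel (lijsten_maken artikel)

-- ===== LEMMAS AND PROOFS =====

theorem modz (b m : Int) : (PySem.Int.mod b m = 0) ↔ ((-b) % |m| = 0) := by
  rw [PySem.Int.mod_eq_zero_iff_dvd, PySem.Int.emod_eq_zero_iff_dvd, Int.dvd_neg, abs_dvd]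

theorem emod_pred (a n : Int) (hn : 0 < n) (h : 0 < (-a) % n) :
    (-(a + 1)) % n = (-a) % n - 1 := by
  have hlt : (-a) % n < n := Int.emod_lt_of_pos _ hn
  rw [show -(a + 1) = -a - 1 by ring, Int.sub_emod,
      show (1 : Int) % n = 1 from Int.emod_eq_of_lt (by omega) (by omega)]
  exact Int.emod_eq_of_lt (by omega) (by omega)

-- A's while loop, with enough fuel, lands on the next multiple of |m| at or above b.
theorem aWhile_eq (m : Int) (hm : m ≠ 0) :
    ∀ (fuel : Nat) (b : Int), ((-b) % |m|).toNat ≤ fuel →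
      aWhile fuel b m = b + (-b) % |m| := by
  intro fuel
  have habs : |m| ≠ 0 := by positivity
  have hpos : (0 : Int) < |m| := by positivity
  induction fuel with
  | zero =>
    intro b hb
    have hnn := Int.emod_nonneg (-b) habs
    have h0 : (-b) % |m| = 0 := by omega
    simp [aWhile, h0]
  | succ f ih =>
    intro b hb
    have hmod : (PySem.Int.mod? b m).getD 0 = PySem.Int.mod b m := by
      simp [PySem.Int.mod?, PySem.Int.mod, hm]
    by_cases h0 : (-b) % |m| = 0
    · have hz : PySem.Int.mod b m = 0 := (modz b m).mpr h0
      simp [aWhile, hmod, hz, h0]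
    · have hnn := Int.emod_nonneg (-b) habs
      have hne : PySem.Int.mod b m ≠ 0 := fun hc => h0 ((modz b m).mp hc)
      have hstep : (-(b + 1)) % |m| = (-b) % |m| - 1 := emod_pred b |m| hpos (by omega)
      have hw : aWhile (f + 1) b m = aWhile f (b + 1) m := by simp [aWhile, hmod, hne]
      rw [hw, ih (b + 1) (by omega)]
      omega

-- A's while loop equals B's single modular rounding step.
theorem aWhile_closed (m b : Int) (hm : m ≠ 0) :
    aWhile m.natAbs b m = b + (PySem.Int.mod? (-b) |m|).getD 0 := by
  have hpos : (0 : Int) < |m| := by positivity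
  have h1 : (PySem.Int.mod? (-b) |m|).getD 0 = PySem.Int.mod (-b) |m| := by
    simp [PySem.Int.mod?, PySem.Int.mod, show |m| ≠ 0 by positivity]
  have h2 : PySem.Int.mod (-b) |m| = (-b) % |m| := PySem.Int.mod_eq_emod_of_pos hpos
  have hub : (-b) % |m| < |m| := Int.emod_lt_of_pos _ hpos
  have hnn := Int.emod_nonneg (-b) (show |m| ≠ 0 by positivity)
  have habs : |m| = (m.natAbs : Int) := Int.abs_eq_natAbs m
  rw [aWhile_eq m hm m.natAbs b (by omega), h1, h2]

-- per-row: B's step is A's step with the pair swapped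
theorem step_swap (row : List String) (hne : row ≠ [])
    (hS : row.headD "" = "S" →
      (pvParse row 3).getD 0 > (pvParse row 4).getD 0 → (pvParse row 2).getD 0 ≠ 0)
    (s : List (List String) × List Int) :
    bStep (s.2, s.1) row = ((aStep s row).2, (aStep s row).1) := by
  obtain ⟨r, rs, rfl⟩ := List.exists_cons_of_ne_nil hne
  have hS' : r = "S" →
      (pvParse (r :: rs) 3).getD 0 > (pvParse (r :: rs) 4).getD 0 →
      (pvParse (r :: rs) 2).getD 0 ≠ 0 := by simpa using hS
  have hh : (PySem.List.pyGet? (r :: rs) 0).getD "" = r := by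
    simp [PySem.List.pyGet?, PySem.List.pyIdx?]
  simp only [bStep, aStep, hh]
  by_cases h1 : r = "S"
  · by_cases h2 : (pvParse (r :: rs) 3).getD 0 > (pvParse (r :: rs) 4).getD 0
    · rw [if_pos h1,
          if_pos (show (pvParse (r :: rs) 3).getD 0 - (pvParse (r :: rs) 4).getD 0 > 0 by omega),
          if_pos ⟨h1, h2⟩, aWhile_closed _ _ (hS' h1 h2)]
    · rw [if_pos h1,
          if_neg (show ¬((pvParse (r :: rs) 3).getD 0 - (pvParse (r :: rs) 4).getD 0 > 0) by omega),
          if_neg (fun h => h2 h.2),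
          if_neg (show ¬(r = "A" ∧ (pvParse (r :: rs) 3).getD 0 ≠ 0) from
            fun h => by rw [h1] at h; exact absurd h.1 (by decide))]
  · rw [if_neg h1,
        if_neg (show ¬(r = "S" ∧ (pvParse (r :: rs) 3).getD 0 > (pvParse (r :: rs) 4).getD 0)
          from fun h => h1 h.1)]
    by_cases hA : r = "A" ∧ (pvParse (r :: rs) 3).getD 0 ≠ 0
    · rw [if_pos hA, if_pos hA]
    · rw [if_neg hA, if_neg hA]

-- fold the swap through the whole list
theorem fold_swap (rows : List (List String))
    (hpre : ∀ row ∈ rows, row ≠ [] ∧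
      (row.headD "" = "S" →
        (pvParse row 3).getD 0 > (pvParse row 4).getD 0 → (pvParse row 2).getD 0 ≠ 0)) :
    ∀ (s : List (List String) × List Int),
      rows.foldl bStep (s.2, s.1) = ((rows.foldl aStep s).2, (rows.foldl aStep s).1) := by
  induction rows with
  | nil => intro s; rfl
  | cons row rows ih =>
    intro s
    obtain ⟨h1, h2⟩ := hpre row (by simp)
    have hrec := ih (fun r hr => hpre r (by simp [hr]))
    simp only [List.foldl_cons, step_swap row h1 h2 s]
    exact hrec (aStep s row)

-- ===== VERDICT (by name: the statement is the Claim_ definition above) =====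
theorem lijsten_maken_spec : Claim_equal_lijsten_maken := by
  intro artikel _ hpre
  unfold Spec_lijsten_maken lijsten_maken lijsten_maken_alt
  rw [PySem.List.foldl_pyRange_zero_pyGetD' artikel [] aStep ([], [])]
  exact (fold_swap artikel
    (fun row hr => ⟨(hpre row hr).1, fun hk hg => (((hpre row hr).2.1 hk).2.2 hg).2⟩)
    ([], [])).symm
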